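-- pv_equiv track=rewrite | github.com/ritwickJ/random-scripts | fruits_and_baskets.py | solution
-- ===== SOURCE A (Python) =====
-- def optimal_count(v,x):
--     count = 0
--     while True:
--
--         if v//2 <= x:
--             count += v-x
--             break
--
--         elif v%2 == 1:
--             v -= 1
--             count +=1
--
--         v = v//2
--         count += 1
--
--     return count
--
-- def double_it(l):
--
--     for i in range(len(l)):
--         l[i] *= 2
--
--     return l
--
-- def solution(target):
--
--     count = 0
--     basket = [0]*len(target)
--     min_pos = target.index(min(target))
--
--     # increment to 1
--     for i,v in enumerate(target):
--         if v>0: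
--             basket[i] = 1
--             count += 1
--
--     # double everything
--     while True:
--         if target[min_pos] < 2*basket[min_pos] or target[min_pos] == 0:
--             break
--
--         basket = double_it(basket)
--         count += 1
--
--     # count individual optimals now
--     for i in range(len(target)):
--         count += optimal_count(target[i], basket[i])
--
--     return count
-- ===== SOURCE B (Python) =====
-- def cost(v, x):
--     # ops to grow one basket from x to v (halve-down greedy, written top-down)
--     if v <= 2 * x + 1:
--         return v - x
--     return 1 + v % 2 + cost(v // 2, x)
--
-- def solution(target):
--     m = min(target)
--     count = sum(1 for v in target if v > 0)
--     b = 1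
--     if m >= 1:
--         k = m.bit_length() - 1
--         count += k
--         b = 2 ** k
--     for v in target:
--         count += cost(v, b if v > 0 else 0)
--     return count
-- ===== Notes on version B (the rewrite author's own statement) =====
-- stated objective: alternative
-- what changed: B drops the basket array entirely: instead of A's repeated double-every-basket passes and index-accumulator loops, it computes the number of global doublings directly as min(target).bit_length()-1 and folds a top-down recursive per-element cost over the list in one pass.
import Mathlib
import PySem

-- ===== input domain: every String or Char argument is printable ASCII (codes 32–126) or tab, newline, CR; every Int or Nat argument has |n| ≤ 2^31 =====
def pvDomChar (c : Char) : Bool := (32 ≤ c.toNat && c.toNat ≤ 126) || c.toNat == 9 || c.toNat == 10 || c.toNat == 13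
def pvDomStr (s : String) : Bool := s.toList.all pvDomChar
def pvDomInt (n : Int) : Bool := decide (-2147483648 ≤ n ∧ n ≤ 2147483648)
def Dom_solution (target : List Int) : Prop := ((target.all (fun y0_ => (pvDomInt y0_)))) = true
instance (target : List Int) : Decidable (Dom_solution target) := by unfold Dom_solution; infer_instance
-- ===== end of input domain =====

-- B is a structurally different implementation: it keeps no basket array and makes no
-- "double every basket" passes — it reads the number of global doublings off
-- min(target).bit_length() and folds a top-down recursive per-element cost over the list.

-- ===== PORT A =====

-- optimal_count's while loop, with fuel (the fuel only makes the loop total; with the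
-- fuel supplied below the 0 case is never reached).
def optA (fuel : Nat) (v x count : Int) : Int :=
  match fuel with
  | 0 => count
  | fuel + 1 =>
    if PySem.Int.floordiv v 2 ≤ x then count + (v - x)
    else
      optA fuel (PySem.Int.floordiv (if PySem.Int.mod v 2 = 1 then v - 1 else v) 2) x
        ((if PySem.Int.mod v 2 = 1 then count + 1 else count) + 1)

def optimalCount (v x : Int) : Int := optA (v.natAbs + 1) v x 0

-- double_it: elementwise in-place doubling of the list (ported as the elementwise map)
def doubleIt (l : List Int) : List Int := l.map (· * 2)

-- the 'for i,v in enumerate(target)' loop: builds basket and counts the +1 increments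
def initLoop : List Int → (List Int × Int)
  | [] => ([], 0)
  | v :: rest =>
    let r := initLoop rest
    ((if 0 < v then (1:Int) else 0) :: r.1, r.2 + (if 0 < v then 1 else 0))

-- the 'double everything' while loop, with fuel (totality guard only)
def doubleLoop (fuel : Nat) (tm minPos : Int) (basket : List Int) (count : Int) :
    List Int × Int :=
  match fuel with
  | 0 => (basket, count)
  | fuel + 1 =>
    if tm < 2 * PySem.List.pyGetD basket minPos 0 ∨ tm = 0 then (basket, count)
    else doubleLoop fuel tm minPos (doubleIt basket) (count + 1)

def solution (target : List Int) : Int :=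
  match PySem.List.min? target (fun y => y) with
  | none => 0  -- Python raises ValueError on the empty list; excluded by Pre_solution
  | some mn =>
    let minPos : Int := ((PySem.List.index? target mn).getD 0 : Nat)
    let ic := initLoop target
    let tm := PySem.List.pyGetD target minPos 0   -- target[min_pos], always in range
    let dl := doubleLoop (tm.natAbs + 1) tm minPos ic.1 ic.2
    (PySem.List.pyRange 0 (target.length : Int) 1).foldl
      (fun c i => c + optimalCount (PySem.List.pyGetD target i 0)
                                   (PySem.List.pyGetD dl.1 i 0)) dl.2

-- ===== PORT B =====

-- cost's recursion, with fuel (totality guard only; never exhausted for the x ≥ 0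
-- arguments solution_alt supplies)
def costB (fuel : Nat) (v x : Int) : Int :=
  match fuel with
  | 0 => v - x
  | fuel + 1 =>
    if v ≤ 2 * x + 1 then v - x
    else 1 + PySem.Int.mod v 2 + costB fuel (PySem.Int.floordiv v 2) x

def cost (v x : Int) : Int := costB (v.natAbs + 1) v x

def solution_alt (target : List Int) : Int :=
  match PySem.List.min? target (fun y => y) with
  | none => 0  -- min raises on the empty list in B as well; excluded by Pre_solution
  | some m =>
    let count0 : Int := (target.countP (fun v => decide (0 < v)) : Nat)
    let count1 : Int := if 1 ≤ m then count0 + ((PySem.Int.bitLength m : Int) - 1) else count0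
    let b : Int := if 1 ≤ m then (2:Int) ^ (PySem.Int.bitLength m - 1) else 1
    target.foldl (fun c v => c + cost v (if 0 < v then b else 0)) count1

-- ===== PRECONDITION & SPEC =====
-- Pre_ excludes only the empty list, on which A raises ValueError (min of empty sequence).
def Pre_solution (target : List Int) : Prop := target ≠ []
instance (target : List Int) : Decidable (Pre_solution target) := by unfold Pre_solution; infer_instance
def pvWitness_solution : List Int := ([3, 1, 5] : List Int)
def Spec_solution (target : List Int) (out : Int) : Prop := out = solution_alt target
instance (target : List Int) (out : Int) : Decidable (Spec_solution target out) := by unfold Spec_solution; infer_instance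

-- ===== CLAIM (what is proved, stated in full; the proofs are below) =====
def Claim_equal_solution : Prop := ∀ (target : List Int), Dom_solution target → Pre_solution target → Spec_solution target (solution target)

-- ===== LEMMAS AND PROOFS =====

-- The two per-element loops agree (same fuel on both sides): A's accumulator loop
-- equals B's top-down recursion, for nonnegative basket value x.
lemma optA_eq_costB (fuel : Nat) : ∀ (v x c : Int), 0 ≤ x → v.natAbs < fuel →
    optA fuel v x c = c + costB fuel v x := by
  induction fuel with
  | zero => intro v x c _ h; omega
  | succ n ih =>
    intro v x c hx hf
    rw [optA, costB]
    have hbr : (PySem.Int.floordiv v 2 ≤ x) ↔ (v ≤ 2 * x + 1) := by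
      constructor
      · intro h
        have := (PySem.Int.floordiv_lt_iff_lt_mul (a := v) (b := 2) (q := x + 1) (by norm_num)).mp (by omega)
        omega
      · intro h
        have := (PySem.Int.floordiv_lt_iff_lt_mul (a := v) (b := 2) (q := x + 1) (by norm_num)).mpr (by omega)
        omega
    by_cases hb : v ≤ 2 * x + 1
    · rw [if_pos (hbr.mpr hb), if_pos hb]
    · rw [if_neg (fun h => hb (hbr.mp h)), if_neg hb]
      have hv2 : 2 * x + 2 ≤ v := by omega
      have hvpos : 2 ≤ v := by omega
      have hfd : PySem.Int.floordiv v 2 = v / 2 := PySem.Int.floordiv_eq_ediv_of_pos (by norm_num)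
      have hmd : PySem.Int.mod v 2 = v % 2 := PySem.Int.mod_eq_emod_of_pos (by norm_num)
      have hsame : PySem.Int.floordiv (if PySem.Int.mod v 2 = 1 then v - 1 else v) 2
          = PySem.Int.floordiv v 2 := by
        rcases PySem.Int.mod_two_eq v with h0 | h1
        · rw [if_neg (by rw [h0]; norm_num)]
        · rw [if_pos h1]
          have := PySem.Int.floordiv_eq_ediv_of_pos (a := v - 1) (b := 2) (by norm_num)
          rw [this, hfd]
          omega
      have hcnt : (if PySem.Int.mod v 2 = 1 then c + 1 else c) + 1
          = c + 1 + PySem.Int.mod v 2 := by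
        rcases PySem.Int.mod_two_eq v with h0 | h1
        · rw [if_neg (by rw [h0]; norm_num), h0]; omega
        · rw [if_pos h1, h1]
      rw [hsame, hcnt]
      have hlt : (PySem.Int.floordiv v 2).natAbs < n := by
        rw [hfd]
        have h1 : 1 ≤ v / 2 := by omega
        have h2 : v / 2 < v := by omega
        omega
      rw [ih (PySem.Int.floordiv v 2) x (c + 1 + PySem.Int.mod v 2) hx hlt]
      ring

lemma optimalCount_eq_cost (v x : Int) (hx : 0 ≤ x) : optimalCount v x = cost v x := by
  unfold optimalCount cost
  simpa using optA_eq_costB (v.natAbs + 1) v x 0 hx (by omega)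

-- initLoop builds the 0/1 indicator basket and the positive count.
lemma initLoop_eq (target : List Int) :
    initLoop target = (target.map (fun v => if 0 < v then (1:Int) else 0),
      ((target.countP (fun v => decide (0 < v)) : Nat) : Int)) := by
  induction target with
  | nil => simp [initLoop]
  | cons v rest ih =>
    simp only [initLoop, ih, List.map_cons, List.countP_cons]
    by_cases h : 0 < v <;> simp [h]

-- the doubling loop on an indicator-times-2^j basket, positive minimum: it runs until
-- the exponent reaches K = bitLength m - 1.
lemma doubleLoop_pos (target : List Int) (m minPos : Int) (hm : 1 ≤ m)
    (hget : ∀ (f : Int → Int), f 0 = 0 →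
      PySem.List.pyGetD (target.map f) minPos 0 = f m) :
    ∀ (fuel j : Nat) (c : Int), j ≤ PySem.Int.bitLength m - 1 →
      PySem.Int.bitLength m - 1 - j < fuel →
      doubleLoop fuel m minPos (target.map (fun v => if 0 < v then (2:Int)^j else 0)) c
        = (target.map (fun v => if 0 < v then (2:Int)^(PySem.Int.bitLength m - 1) else 0),
           c + ((PySem.Int.bitLength m - 1 - j : Nat) : Int)) := by
  have hmabs : (m.natAbs : Int) = m := Int.natAbs_of_nonneg (by omega)
  have hbl1 : 1 ≤ PySem.Int.bitLength m := by
    by_contra h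
    have := PySem.Int.lt_two_pow_bitLength m
    interval_cases hb : PySem.Int.bitLength m
    · simp at this; omega
  intro fuel
  induction fuel with
  | zero => intro j c hj hf; omega
  | succ n ih =>
    intro j c hj hf
    rw [doubleLoop]
    have hget' : PySem.List.pyGetD (target.map (fun v => if 0 < v then (2:Int)^j else 0)) minPos 0
        = (2:Int)^j := by
      rw [hget (fun v => if 0 < v then (2:Int)^j else 0) (by norm_num)]
      show (if 0 < m then (2:Int)^j else 0) = 2^j
      rw [if_pos (by omega)]
    rw [hget']
    by_cases hj' : j = PySem.Int.bitLength m - 1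
    · have hlt : m < 2 * 2^j := by
        have h1 := PySem.Int.lt_two_pow_bitLength m
        have h2 : (m.natAbs : Int) < ((2 ^ PySem.Int.bitLength m : Nat) : Int) := by
          exact_mod_cast h1
        have h3 : ((2 ^ PySem.Int.bitLength m : Nat) : Int) = 2 * 2^j := by
          push_cast
          rw [hj']
          rw [← pow_succ']
          congr 1
          omega
        omega
      rw [if_pos (Or.inl hlt), hj']
      simp
    · have hjlt : j < PySem.Int.bitLength m - 1 := by omega
      have hnlt : ¬ (m < 2 * 2^j ∨ m = 0) := by
        rintro (h | h)
        · have h1 := PySem.Int.two_pow_bitLength_le m (by omega)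
          have h2 : ((2 ^ (PySem.Int.bitLength m - 1) : Nat) : Int) ≤ (m.natAbs : Int) := by
            exact_mod_cast h1
          have h3 : (2:Int) * 2^j ≤ ((2 ^ (PySem.Int.bitLength m - 1) : Nat) : Int) := by
            push_cast
            rw [← pow_succ']
            exact pow_le_pow_right₀ (by norm_num) (by omega)
          omega
        · omega
      rw [if_neg hnlt]
      have hdbl : doubleIt (target.map (fun v => if 0 < v then (2:Int)^j else 0))
          = target.map (fun v => if 0 < v then (2:Int)^(j+1) else 0) := by
        unfold doubleIt
        rw [List.map_map]
        apply List.map_congr_left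
        intro v _
        simp only [Function.comp_apply, apply_ite (· * (2:Int))]
        rw [pow_succ]
        simp
      rw [hdbl, ih (j+1) (c+1) (by omega) (by omega)]
      simp only [Prod.mk.injEq]
      refine ⟨trivial, ?_⟩
      · have : PySem.Int.bitLength m - 1 - j = (PySem.Int.bitLength m - 1 - (j+1)) + 1 := by omega
        rw [this]
        push_cast
        ring

-- the final counting loop of A equals B's fold, for a common basket value b ≥ 0
lemma tail_eq (target : List Int) (b c : Int) (hb : 0 ≤ b) :
    (PySem.List.pyRange 0 (target.length : Int) 1).foldl
      (fun c i => c + optimalCount (PySem.List.pyGetD target i 0)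
        (PySem.List.pyGetD (target.map (fun v => if 0 < v then b else 0)) i 0)) c
    = target.foldl (fun c v => c + cost v (if 0 < v then b else 0)) c := by
  have hmap : ∀ i : Int, PySem.List.pyGetD (target.map (fun v => if 0 < v then b else 0)) i 0
      = (fun v => if 0 < v then b else 0) (PySem.List.pyGetD target i 0) := by
    intro i
    have := PySem.List.pyGetD_map (fun v => if 0 < v then b else 0) target i 0
    simpa using this
  simp only [hmap]
  rw [PySem.List.foldl_pyRange_zero_pyGetD' target 0
    (fun c v => c + optimalCount v (if 0 < v then b else 0)) c]
  apply PySem.List.foldl_congr_mem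
  intro acc x _
  rw [optimalCount_eq_cost]
  split_ifs <;> omega

-- ===== VERDICT (by name: the statement is the Claim_ definition above) =====
theorem solution_spec : Claim_equal_solution := by
  intro target _ hpre
  unfold Spec_solution solution solution_alt
  cases hmin : PySem.List.min? target (fun y => y) with
  | none => exact absurd ((PySem.List.min?_eq_none_iff _ _).mp hmin) hpre
  | some m =>
    have hmem : m ∈ target := PySem.List.min?_mem hmin
    obtain ⟨i, hi⟩ := Option.isSome_iff_exists.mp
      ((PySem.List.index?_isSome_iff target m).mpr hmem)
    obtain ⟨hik, hval, _⟩ := PySem.List.getElem_of_index?_eq_some hi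
    dsimp only
    simp only [hi, Option.getD_some]
    have hgetT : PySem.List.pyGetD target (i : Int) 0 = m := by
      rw [PySem.List.pyGetD_eq_getElem target 0 (by positivity) (by exact_mod_cast hik)]
      simpa using hval
    have hgetM : ∀ (f : Int → Int), f 0 = 0 →
        PySem.List.pyGetD (target.map f) (i : Int) 0 = f m := by
      intro f _
      rw [PySem.List.pyGetD_eq_getElem (target.map f) 0 (by positivity)
        (by simpa using (by exact_mod_cast hik : (i : Int) < (target.length : Int)))]
      simp only [Int.toNat_natCast, List.getElem_map]
      rw [hval]
    rw [initLoop_eq, hgetT]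
    by_cases hm : 1 ≤ m
    · -- positive minimum: the doubling loop runs bitLength m - 1 times
      have hK : PySem.Int.bitLength m - 1 < m.natAbs + 1 := by
        have h1 := PySem.Int.two_pow_bitLength_le m (by omega)
        have h2 := Nat.lt_two_pow_self (n := PySem.Int.bitLength m - 1)
        omega
      have h0 : (target.map (fun v => if 0 < v then (1:Int) else 0))
          = target.map (fun v => if 0 < v then (2:Int)^(0:Nat) else 0) := by
        simp
      rw [h0, doubleLoop_pos target m (i : Int) hm hgetM (m.natAbs + 1) 0
        ((target.countP (fun v => decide (0 < v)) : Nat) : Int) (by omega) (by omega)]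
      rw [tail_eq target ((2:Int)^(PySem.Int.bitLength m - 1)) _ (by positivity)]
      rw [if_pos hm, if_pos hm]
      have hbl1 : 1 ≤ PySem.Int.bitLength m := by
        by_contra h
        have := PySem.Int.lt_two_pow_bitLength m
        interval_cases hb : PySem.Int.bitLength m
        · simp at this; omega
      have : ((PySem.Int.bitLength m - 1 - 0 : Nat) : Int)
          = (PySem.Int.bitLength m : Int) - 1 := by omega
      rw [this]
    · -- minimum ≤ 0: the doubling loop exits immediately
      have hstop : doubleLoop (m.natAbs + 1) m (i : Int)
          (target.map (fun v => if 0 < v then (1:Int) else 0))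
          ((target.countP (fun v => decide (0 < v)) : Nat) : Int)
          = (target.map (fun v => if 0 < v then (1:Int) else 0),
             ((target.countP (fun v => decide (0 < v)) : Nat) : Int)) := by
        rw [doubleLoop]
        rw [hgetM (fun v => if 0 < v then (1:Int) else 0) (by norm_num)]
        rw [if_pos]
        rw [if_neg (by omega)]
        omega
      rw [hstop]
      rw [tail_eq target 1 _ (by norm_num)]
      rw [if_neg hm, if_neg hm]
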